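-- pv_equiv track=rewrite | github.com/sinmb79/Library-of-Longing | scripts/audio_sourcing/library.py | _find_nps_match
-- ===== SOURCE A (Python) =====
-- from typing import Any
--
-- def _find_nps_match(query: str, entries: list[dict[str, Any]]) -> dict[str, Any] | None:
--     words = [word for word in query.split() if word]
--     for entry in entries:
--         haystack = f"{entry['title']} {entry['category']}".lower()
--         if all(word in haystack for word in words):
--             return entry
--     for entry in entries:
--         haystack = f"{entry['title']} {entry['category']}".lower()
--         if any(word in haystack for word in words):
--             return entry
--     return None
-- ===== SOURCE B (Python) =====
-- def _find_nps_match(query, entries):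
--     words = [word for word in query.split() if word]
--     fallback = None
--     for entry in entries:
--         haystack = f"{entry['title']} {entry['category']}".lower()
--         hits = sum(1 for word in words if word in haystack)
--         if hits == len(words):
--             return entry
--         if fallback is None and hits > 0:
--             fallback = entry
--     return fallback
-- ===== Notes on version B (the rewrite author's own statement) =====
-- stated objective: alternative
-- what changed: Replaces A's two full scans (first for an all-words match, then again for an any-words match) by a single pass that counts per-entry word hits, returns immediately on a full match and carries the first partial match as a fallback returned after the loop.
import Mathlib
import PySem

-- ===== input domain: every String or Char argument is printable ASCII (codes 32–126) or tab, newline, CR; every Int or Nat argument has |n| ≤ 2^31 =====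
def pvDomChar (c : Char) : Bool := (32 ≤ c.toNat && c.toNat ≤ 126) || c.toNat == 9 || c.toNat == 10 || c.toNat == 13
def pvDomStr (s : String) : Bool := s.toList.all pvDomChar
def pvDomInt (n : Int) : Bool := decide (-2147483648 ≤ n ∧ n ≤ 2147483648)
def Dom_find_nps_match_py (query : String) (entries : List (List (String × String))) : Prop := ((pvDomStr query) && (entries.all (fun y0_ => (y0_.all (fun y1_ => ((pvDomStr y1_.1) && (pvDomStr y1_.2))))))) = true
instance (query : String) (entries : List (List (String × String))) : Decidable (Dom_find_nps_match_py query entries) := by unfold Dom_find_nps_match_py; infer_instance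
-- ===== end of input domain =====

-- B does the work of A's two scans in one pass (early return on a full match, first
-- partial match kept as a fallback); same objective and cost, different decomposition.

-- ===== PORT A =====
-- haystack = f"{entry['title']} {entry['category']}".lower(); within Pre_ both keys are
-- present, so getD never takes its default (a missing key is Python's KeyError, excluded by Pre_).
def pvHay (entry : List (String × String)) : String :=
  PySem.Str.lower ((PySem.Dict.mk entry).getD "title" "" ++ " " ++ (PySem.Dict.mk entry).getD "category" "")

def find_nps_match_py (query : String) (entries : List (List (String × String))) : Option (List (String × String)) :=
  let words := (PySem.Str.split₀ query).filter (fun w => !(w == ""))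
  -- first loop: return the first entry containing ALL words
  match entries.find? (fun e => words.all (fun w => PySem.Str.isIn w (pvHay e))) with
  | some e => some e
  -- second loop: otherwise the first entry containing ANY word, else None
  | none => entries.find? (fun e => words.any (fun w => PySem.Str.isIn w (pvHay e)))

-- ===== PORT B =====
-- single pass: count the word hits of each entry once; full match returns at once,
-- the first partial match is remembered in the fallback and returned after the loop.
def pvGoB (words : List String) (entries : List (List (String × String)))
    (fallback : Option (List (String × String))) : Option (List (String × String)) :=
  match entries with
  | [] => fallback
  | e :: rest =>
    let hay := pvHay e
    let hits := words.countP (fun w => PySem.Str.isIn w hay)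
    if hits = words.length then some e
    else pvGoB words rest
      (match fallback with
       | some f => some f
       | none => if 0 < hits then some e else none)

def find_nps_match_py_alt (query : String) (entries : List (List (String × String))) : Option (List (String × String)) :=
  pvGoB ((PySem.Str.split₀ query).filter (fun w => !(w == ""))) entries none

-- ===== PRECONDITION & SPEC =====
-- Pre_ excludes exactly the inputs on which Python A raises KeyError: an entry missing a
-- 'title' or 'category' key is reached (no earlier all-words match lets A return first).
def pvHasKeys (e : List (String × String)) : Bool :=
  (PySem.Dict.mk e).contains "title" && (PySem.Dict.mk e).contains "category"

-- declarative 'entry e matches all query words'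
def pvAllMatch (query : String) (e : List (String × String)) : Bool :=
  ((PySem.Str.split₀ query).filter (fun w => !(w == ""))).all (fun w => PySem.Str.isIn w (pvHay e))

def Pre_find_nps_match_py (query : String) (entries : List (List (String × String))) : Prop :=
  (entries.all pvHasKeys
    || entries.zipIdx.any (fun p => (entries.take (p.2 + 1)).all pvHasKeys && pvAllMatch query p.1)) = true
instance (query : String) (entries : List (List (String × String))) : Decidable (Pre_find_nps_match_py query entries) := by unfold Pre_find_nps_match_py; infer_instance

def pvWitness_find_nps_match_py : String × (List (List (String × String))) :=
  ("book", [[("title", "A Book"), ("category", "fiction")]])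

def Spec_find_nps_match_py (query : String) (entries : List (List (String × String))) (out : Option (List (String × String))) : Prop := out = find_nps_match_py_alt query entries
instance (query : String) (entries : List (List (String × String))) (out : Option (List (String × String))) : Decidable (Spec_find_nps_match_py query entries out) := by unfold Spec_find_nps_match_py; infer_instance

-- ===== CLAIM (what is proved, stated in full; the proofs are below) =====
def Claim_equal_find_nps_match_py : Prop := ∀ (query : String) (entries : List (List (String × String))), Dom_find_nps_match_py query entries → Pre_find_nps_match_py query entries → Spec_find_nps_match_py query entries (find_nps_match_py query entries)

-- ===== LEMMAS AND PROOFS =====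

-- hits = len(words)  ⟺  every word is in the haystack
theorem pvHits_all (words : List String) (hay : String) :
    (words.countP (fun w => PySem.Str.isIn w hay) = words.length)
      ↔ words.all (fun w => PySem.Str.isIn w hay) = true := by
  rw [List.countP_eq_length, List.all_eq_true]

-- hits > 0  ⟺  some word is in the haystack
theorem pvHits_any (words : List String) (hay : String) :
    (0 < words.countP (fun w => PySem.Str.isIn w hay))
      ↔ words.any (fun w => PySem.Str.isIn w hay) = true := by
  rw [List.countP_pos_iff, List.any_eq_true]

-- the one-pass loop with fallback equals the two-scan structure
theorem pvGoB_eq (words : List String) (entries : List (List (String × String)))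
    (fb : Option (List (String × String))) :
    pvGoB words entries fb =
      match entries.find? (fun e => words.all (fun w => PySem.Str.isIn w (pvHay e))) with
      | some e => some e
      | none =>
        match fb with
        | some f => some f
        | none => entries.find? (fun e => words.any (fun w => PySem.Str.isIn w (pvHay e))) := by
  induction entries generalizing fb with
  | nil => cases fb <;> rfl
  | cons e rest ih =>
    simp only [pvGoB, List.find?_cons]
    by_cases hall : words.all (fun w => PySem.Str.isIn w (pvHay e)) = true
    · have hc : words.countP (fun w => PySem.Str.isIn w (pvHay e)) = words.length :=
        (pvHits_all words (pvHay e)).mpr hall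
      rw [if_pos hc, hall]
    · have hc : words.countP (fun w => PySem.Str.isIn w (pvHay e)) ≠ words.length := by
        intro h; exact hall ((pvHits_all words (pvHay e)).mp h)
      rw [Bool.not_eq_true] at hall
      rw [if_neg hc, hall, ih]
      cases hfa : List.find? (fun e => words.all (fun w => PySem.Str.isIn w (pvHay e))) rest with
      | some f => rfl
      | none =>
        by_cases hany : words.any (fun w => PySem.Str.isIn w (pvHay e)) = true
        · have hp : 0 < words.countP (fun w => PySem.Str.isIn w (pvHay e)) :=
            (pvHits_any words (pvHay e)).mpr hany
          cases fb with
          | some f => rfl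
          | none => rw [if_pos hp, hany]
        · have hp : ¬ 0 < words.countP (fun w => PySem.Str.isIn w (pvHay e)) := by
            intro h; exact hany ((pvHits_any words (pvHay e)).mp h)
          rw [Bool.not_eq_true] at hany
          cases fb with
          | some f => rfl
          | none => rw [if_neg hp, hany]

-- ===== VERDICT (by name: the statement is the Claim_ definition above) =====
theorem find_nps_match_py_spec : Claim_equal_find_nps_match_py := by
  intro query entries _ _
  unfold Spec_find_nps_match_py find_nps_match_py find_nps_match_py_alt
  rw [pvGoB_eq]
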